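-- pv_equiv track=rewrite | github.com/kylemaa/Hackerrank | LeetCode/Screening/alternating-array.py | alternatingSort
-- ===== SOURCE A (Python) =====
-- def alternatingSort(a):
--     n = len(a)
--     b = []
--     i = 0
--     j = n-1
--     while i < j:
--         b.append(a[i])
--         i += 1
--         b.append(a[j])
--         j -= 1
--     # If start and end comes into the same index then add the num to the end of b array
--     if i == j:
--         b.append(a[i])
--     k = 0
--     while k < len(b)-1:
--         if b[k] >= b[k+1]:
--             return False
--         k += 1
--     return True
-- ===== SOURCE B (Python) =====
-- def alternatingSort(a):
--     n = len(a)
--     i = 0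
--     j = n - 1
--     while i < j:
--         if a[i] >= a[j]:
--             return False
--         if i + 1 <= j - 1 and a[j] >= a[i + 1]:
--             return False
--         i += 1
--         j -= 1
--     return True
-- ===== Notes on version B (the rewrite author's own statement) =====
-- stated objective: faster
-- what changed: B never materialises the interleaved list: a single two-pointer walk checks the front-vs-back pair and the back-vs-next-front pair in place, returning False at the first violation, instead of A's two passes (build list b by repeated appends, then scan b for adjacent violations).
import Mathlib
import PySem

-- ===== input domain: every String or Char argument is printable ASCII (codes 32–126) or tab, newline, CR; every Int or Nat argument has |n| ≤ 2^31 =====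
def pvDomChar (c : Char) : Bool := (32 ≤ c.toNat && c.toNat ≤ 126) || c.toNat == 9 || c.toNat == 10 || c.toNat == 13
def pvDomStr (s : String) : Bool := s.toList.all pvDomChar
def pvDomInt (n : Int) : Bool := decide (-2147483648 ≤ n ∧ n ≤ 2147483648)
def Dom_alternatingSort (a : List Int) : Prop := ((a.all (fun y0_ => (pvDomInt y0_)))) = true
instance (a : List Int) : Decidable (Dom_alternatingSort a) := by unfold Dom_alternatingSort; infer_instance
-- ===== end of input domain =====

-- B replaces A's two passes (build interleaved list b, then scan b) by one in-place two-pointer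
-- walk with O(1) extra space; same return value, objective: alternative decomposition.
-- (Loops are ported with a structural fuel counter, always called with enough fuel for totality.)

-- ===== PORT A =====
-- first loop of A: builds b by appending a[i], a[j] while i < j, plus the middle element
def pvBuild (a : List Int) : Nat → Int → Int → List Int → List Int
  | 0, _, _, b => b
  | fuel + 1, i, j, b =>
    if i < j then
      pvBuild a fuel (i + 1) (j - 1) (b ++ [PySem.List.pyGetD a i 0, PySem.List.pyGetD a j 0])
    else if i = j then b ++ [PySem.List.pyGetD a i 0]
    else b

-- second loop of A: scan b for an adjacent non-increase
def pvCheck (b : List Int) : Nat → Int → Bool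
  | 0, _ => true
  | fuel + 1, k =>
    if k < (b.length : Int) - 1 then
      if PySem.List.pyGetD b k 0 ≥ PySem.List.pyGetD b (k + 1) 0 then false
      else pvCheck b fuel (k + 1)
    else true

def alternatingSort (a : List Int) : Bool :=
  let bb := pvBuild a (a.length + 1) 0 ((a.length : Int) - 1) []
  pvCheck bb (bb.length + 1) 0

-- ===== PORT B =====
-- single two-pointer walk, no list is built
def pvWalk (a : List Int) : Nat → Int → Int → Bool
  | 0, _, _ => true
  | fuel + 1, i, j =>
    if i < j then
      if PySem.List.pyGetD a i 0 ≥ PySem.List.pyGetD a j 0 then false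
      else if i + 1 ≤ j - 1 ∧ PySem.List.pyGetD a j 0 ≥ PySem.List.pyGetD a (i + 1) 0 then false
      else pvWalk a fuel (i + 1) (j - 1)
    else true

def alternatingSort_alt (a : List Int) : Bool :=
  pvWalk a (a.length + 1) 0 ((a.length : Int) - 1)

-- ===== PRECONDITION & SPEC =====
def Spec_alternatingSort (a : List Int) (out : Bool) : Prop := out = alternatingSort_alt a
instance (a : List Int) (out : Bool) : Decidable (Spec_alternatingSort a out) := by unfold Spec_alternatingSort; infer_instance

-- ===== CLAIM (what is proved, stated in full; the proofs are below) =====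
def Claim_equal_alternatingSort : Prop := ∀ (a : List Int), Dom_alternatingSort a → Spec_alternatingSort a (alternatingSort a)

-- ===== LEMMAS AND PROOFS =====

/-- the interleaved list built by A's first loop, without the accumulator -/
def coreL (a : List Int) (i j : Int) : List Int :=
  if i < j then
    PySem.List.pyGetD a i 0 :: PySem.List.pyGetD a j 0 :: coreL a (i + 1) (j - 1)
  else if i = j then [PySem.List.pyGetD a i 0]
  else []
termination_by (j - i).toNat
decreasing_by omega

/-- strict-increase check of adjacent elements, structurally -/
def chainB : List Int → Bool
  | [] => true
  | [_] => true
  | x :: y :: l => decide (x < y) && chainB (y :: l)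

theorem chainB_cons (x : Int) (l : List Int) :
    chainB (x :: l) = ((l.head?.all (fun h => decide (x < h))) && chainB l) := by
  cases l <;> simp [chainB]

theorem chainB_cons_cons (x y : Int) (l : List Int) :
    chainB (x :: y :: l) = (decide (x < y) && chainB (y :: l)) := rfl

theorem chainB_short (l : List Int) (h : l.length ≤ 1) : chainB l = true := by
  match l, h with
  | [], _ => rfl
  | [_], _ => rfl

theorem coreL_head? (a : List Int) (i j : Int) :
    (coreL a i j).head? = if i ≤ j then some (PySem.List.pyGetD a i 0) else none := by
  rw [coreL]
  split_ifs with h1 h2 h3 h4 <;> simp_all <;> omega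

theorem build_eq (a : List Int) (fuel : Nat) (i j : Int) (b : List Int)
    (hf : j - i < 2 * fuel) : pvBuild a fuel i j b = b ++ coreL a i j := by
  induction fuel generalizing i j b with
  | zero =>
    rw [coreL, if_neg (by omega : ¬ i < j), if_neg (by omega : ¬ i = j)]
    simp [pvBuild]
  | succ fuel ih =>
    rw [pvBuild, coreL]
    split_ifs with h1 h2
    · rw [ih _ _ _ (by omega)]; simp
    · rfl
    · simp

theorem check_eq (b : List Int) (fuel : Nat) (k : Nat)
    (hf : (b.length : Int) - 1 - k < fuel) : pvCheck b fuel (k : Int) = chainB (b.drop k) := by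
  induction fuel generalizing k with
  | zero =>
    rw [pvCheck]
    exact (chainB_short _ (by simp; omega)).symm
  | succ fuel ih =>
    rw [pvCheck]
    by_cases h : (k : Int) < (b.length : Int) - 1
    · have hk1 : k + 1 < b.length := by omega
      have hk : k < b.length := by omega
      have hd : b.drop k = b[k] :: b.drop (k + 1) := List.drop_eq_getElem_cons hk
      have hd1 : b.drop (k + 1) = b[k + 1] :: b.drop (k + 2) := List.drop_eq_getElem_cons hk1
      have hc : (k : Int) + 1 = ((k + 1 : Nat) : Int) := by push_cast; ring
      rw [if_pos h, hc, ih (k + 1) (by omega), hd, hd1, chainB]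
      simp only [PySem.List.pyGetD_natCast, List.getD_eq_getElem?_getD,
        List.getElem?_eq_getElem hk, List.getElem?_eq_getElem hk1, Option.getD_some]
      split_ifs with hge
      · rw [decide_eq_false (by omega : ¬ b[k] < b[k + 1]), Bool.false_and]
      · rw [← hd1, decide_eq_true (by omega : b[k] < b[k + 1]), Bool.true_and]
    · rw [if_neg h]
      exact (chainB_short _ (by simp; omega)).symm

theorem walk_eq (a : List Int) (fuel : Nat) (i j : Int) (hf : j - i < 2 * fuel) :
    pvWalk a fuel i j = chainB (coreL a i j) := by
  induction fuel generalizing i j with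
  | zero =>
    rw [pvWalk, coreL, if_neg (by omega : ¬ i < j), if_neg (by omega : ¬ i = j)]
    rfl
  | succ fuel ih =>
    rw [pvWalk, coreL]
    by_cases hij : i < j
    · rw [if_pos hij, if_pos hij, chainB_cons_cons, chainB_cons, coreL_head?,
        ih (i + 1) (j - 1) (by omega)]
      by_cases h1 : PySem.List.pyGetD a i 0 ≥ PySem.List.pyGetD a j 0
      · rw [if_pos h1,
          decide_eq_false (by omega : ¬ PySem.List.pyGetD a i 0 < PySem.List.pyGetD a j 0),
          Bool.false_and]
      · rw [if_neg h1,
          decide_eq_true (by omega : PySem.List.pyGetD a i 0 < PySem.List.pyGetD a j 0),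
          Bool.true_and]
        by_cases hm : i + 1 ≤ j - 1
        · rw [if_pos hm]
          by_cases h4 : PySem.List.pyGetD a j 0 ≥ PySem.List.pyGetD a (i + 1) 0
          · rw [if_pos ⟨hm, h4⟩, Option.all_some,
              decide_eq_false (by omega :
                ¬ PySem.List.pyGetD a j 0 < PySem.List.pyGetD a (i + 1) 0),
              Bool.false_and]
          · rw [if_neg (fun h => h4 h.2), Option.all_some,
              decide_eq_true (by omega :
                PySem.List.pyGetD a j 0 < PySem.List.pyGetD a (i + 1) 0),
              Bool.true_and]
        · rw [if_neg (fun h => hm h.1), if_neg hm, Option.all_none, Bool.true_and]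
    · rw [if_neg hij, if_neg hij]
      split_ifs <;> simp [chainB]

-- ===== VERDICT (by name: the statement is the Claim_ definition above) =====
theorem alternatingSort_spec : Claim_equal_alternatingSort := by
  intro a _
  unfold Spec_alternatingSort alternatingSort alternatingSort_alt
  rw [build_eq a (a.length + 1) 0 ((a.length : Int) - 1) [] (by omega), List.nil_append,
    show (0 : Int) = ((0 : Nat) : Int) from rfl, check_eq _ _ _ (by omega), List.drop_zero]
  exact (walk_eq a (a.length + 1) _ _ (by omega)).symm
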